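-- pv_equiv track=rewrite | github.com/manwar/perlweeklychallenge-club | challenge-206/roger-bell-west/python/ch-2.py | arraypairing
-- ===== SOURCE A (Python) =====
-- from itertools import permutations, combinations
--
-- def arraypairing(n):
--   nl = len(n)
--   if nl % 2 == 1:
--     return 0
--   hl = nl // 2
--   out = []
--   for px in combinations(range(nl), hl):
--     pa = [n[i] for i in px]
--     ps = set(px)
--     pb = [n[i] for i in range(nl) if i not in ps]
--     for pp in permutations(pa):
--       s = 0
--       for i in range(hl):
--         s += min(pp[i], pb[i])
--       out.append(s)
--   return max(out)
-- ===== SOURCE B (Python) =====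
-- def arraypairing(n):
--   if len(n) % 2 == 1:
--     return 0
--   total = 0
--   take = True
--   for x in sorted(n):
--     if take:
--       total += x
--     take = not take
--   return total
-- ===== Notes on version B (the rewrite author's own statement) =====
-- stated objective: faster
-- what changed: Replaces the exhaustive enumeration of all index subsets and permutations (maximising the sum of pair-minimums over every pairing) with sort-ascending and sum every second element, which provably attains that maximum.
import Mathlib
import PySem

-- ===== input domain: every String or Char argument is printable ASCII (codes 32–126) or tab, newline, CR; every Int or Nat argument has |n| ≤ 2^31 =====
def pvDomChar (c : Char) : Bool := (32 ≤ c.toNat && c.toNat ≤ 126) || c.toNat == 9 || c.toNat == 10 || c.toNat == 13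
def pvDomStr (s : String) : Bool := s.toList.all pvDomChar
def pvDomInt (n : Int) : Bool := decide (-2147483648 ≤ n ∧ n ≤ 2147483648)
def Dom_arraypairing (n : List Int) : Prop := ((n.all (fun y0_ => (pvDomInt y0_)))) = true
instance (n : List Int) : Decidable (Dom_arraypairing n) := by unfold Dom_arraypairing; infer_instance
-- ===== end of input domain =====

-- B replaces A's exhaustive search over all pairings by "sort ascending, sum every second
-- element", which provably attains the same maximum (objective: faster, asymptotically).

-- ===== PORT A =====
-- Literal port of A.  itertools.combinations / itertools.permutations and Python's max
-- are the PySem primitives; n[i] is pyGetD (every index produced by the loops is in range).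
def arraypairing (n : List Int) : Int :=
  let nl : Int := (n.length : Int)
  if PySem.Int.mod nl 2 == 1 then 0
  else
    let hl : Int := PySem.Int.floordiv nl 2
    let out : List Int :=
      (PySem.List.combinations (PySem.List.pyRange 0 nl 1) hl.toNat).foldl
        (fun out px =>
          let pa := px.map (fun i => PySem.List.pyGetD n i 0)
          let ps := PySem.Set.ofList px
          let pb := ((PySem.List.pyRange 0 nl 1).filter
                      (fun i => !(PySem.Set.contains ps i))).map
                    (fun i => PySem.List.pyGetD n i 0)
          (PySem.List.permutations pa pa.length).foldl
            (fun out pp =>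
              out ++ [(PySem.List.pyRange 0 hl 1).foldl
                        (fun s i =>
                          s + min (PySem.List.pyGetD pp i 0) (PySem.List.pyGetD pb i 0)) 0])
            out)
        []
    -- max(out): out is provably nonempty here (combinations and permutations are never
    -- empty for hl ≤ nl), so Python's max never raises; the default of getD is never used.
    (PySem.List.max? out (fun x => x)).getD 0

-- ===== PORT B =====
-- 'for x in sorted(n): if take: total += x; take = not take' — one fold with the
-- two loop variables (total, take) as the accumulator.
def arraypairing_alt (n : List Int) : Int :=
  if PySem.Int.mod ((n.length : Int)) 2 == 1 then 0
  else ((PySem.List.sorted n (fun x => x) false).foldl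
    (fun st x => (if st.2 then st.1 + x else st.1, !st.2)) ((0 : Int), true)).1

-- ===== PRECONDITION & SPEC =====
def Spec_arraypairing (n : List Int) (out : Int) : Prop := out = arraypairing_alt n
instance (n : List Int) (out : Int) : Decidable (Spec_arraypairing n out) := by unfold Spec_arraypairing; infer_instance

-- ===== CLAIM (what is proved, stated in full; the proofs are below) =====
def Claim_equal_arraypairing : Prop := ∀ (n : List Int), Dom_arraypairing n → Spec_arraypairing n (arraypairing n)

-- ===== LEMMAS AND PROOFS =====

-- sum of the elements at even positions
def evenSum : List Int → Int
  | [] => 0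
  | a :: t => a + evenSum (t.drop 1)
termination_by l => l.length
decreasing_by simp

theorem altLoop_eq : ∀ (m : List Int) (total : Int) (take : Bool),
    (m.foldl (fun st x => (if st.2 then st.1 + x else st.1, !st.2)) (total, take)).1
      = total + evenSum (if take then m else m.drop 1) := by
  intro m
  induction m with
  | nil => intro total take; cases take <;> simp [evenSum]
  | cons a t ih =>
    intro total take
    cases take with
    | false =>
      simp only [List.foldl_cons, if_false, Bool.not_false, Bool.false_eq_true, List.drop_succ_cons]
      rw [ih total true]
      simp
    | true =>
      simp only [List.foldl_cons, if_true, Bool.not_true]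
      rw [ih (total + a) false]
      simp [evenSum]
      omega

-- a list of pairs, its multiset of members, and its sum of pair-minimums
def toMul (P : List (Int × Int)) : List Int := P.flatMap (fun q => [q.1, q.2])

def msum (P : List (Int × Int)) : Int := (P.map (fun q => min q.1 q.2)).sum

theorem length_toMul (P : List (Int × Int)) : (toMul P).length = 2 * P.length := by
  induction P with
  | nil => simp [toMul]
  | cons q P ih => simp [toMul] at ih ⊢; omega

-- extract the pair containing a given element
theorem extract_pair : ∀ {P : List (Int × Int)} {a : Int}, a ∈ toMul P →
    ∃ x Q, P.length = Q.length + 1 ∧ msum P = min a x + msum Q ∧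
      ((toMul P : Multiset Int) = a ::ₘ x ::ₘ (toMul Q : Multiset Int)) := by
  intro P
  induction P with
  | nil => intro a h; simp [toMul] at h
  | cons q P ih =>
    intro a h
    have hcons : toMul (q :: P) = q.1 :: q.2 :: toMul P := rfl
    rw [hcons] at h
    rcases List.mem_cons.mp h with h1 | h2
    · subst h1
      exact ⟨q.2, P, by simp, by simp [msum], by simp [hcons, ← Multiset.cons_coe]⟩
    rcases List.mem_cons.mp h2 with h3 | h4
    · subst h3
      refine ⟨q.1, P, by simp, by simp [msum, min_comm], ?_⟩
      simp only [hcons, ← Multiset.cons_coe]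
      rw [Multiset.cons_swap]
    · obtain ⟨x, Q, hl, hs, hm⟩ := ih h4
      refine ⟨x, q :: Q, by simp [hl], ?_, ?_⟩
      · simp only [msum, List.map_cons, List.sum_cons] at hs ⊢
        rw [hs]; ring
      · have hcons2 : toMul (q :: Q) = q.1 :: q.2 :: toMul Q := rfl
        simp only [hcons, hcons2, ← Multiset.cons_coe]
        rw [hm]
        simp only [← Multiset.singleton_add]; abel

-- the pairing theorem, upper half: any pairing's min-sum is at most the sorted even-position sum
theorem msum_le_evenSum : ∀ (k : Nat) (P : List (Int × Int)) (m : List Int),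
    P.length = k → m.Pairwise (· ≤ ·) → (toMul P : Multiset Int) = (m : Multiset Int) →
    msum P ≤ evenSum m := by
  intro k
  induction k using Nat.strong_induction_on with
  | _ k ihk =>
  intro P m hlen hpw hmul
  cases P with
  | nil =>
    have : m = [] := by
      have := hmul.symm
      simp only [toMul, List.flatMap_nil] at this
      exact (Multiset.coe_eq_zero m).mp (by simpa using this)
    subst this
    simp [msum, evenSum]
  | cons q P' =>
    -- m has at least two elements
    have hcard : m.length = 2 * (P'.length + 1) := by
      have h1 := congrArg Multiset.card hmul
      simp only [Multiset.coe_card] at h1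
      rw [← h1, length_toMul]; simp
    match m, hpw with
    | s0 :: s1 :: m'', hpw =>
    have hs01 : s0 ≤ s1 := (List.pairwise_cons.mp hpw).1 s1 (by simp)
    have hs0all : ∀ z ∈ m'', s0 ≤ z := fun z hz => (List.pairwise_cons.mp hpw).1 z (by simp [hz])
    have hs1all : ∀ z ∈ m'', s1 ≤ z :=
      fun z hz => (List.pairwise_cons.mp (List.pairwise_cons.mp hpw).2).1 z hz
    have hpw'' : m''.Pairwise (· ≤ ·) := (List.pairwise_cons.mp (List.pairwise_cons.mp hpw).2).2
    -- s0 is in the pairing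
    have hs0mem : s0 ∈ toMul (q :: P') := by
      have : s0 ∈ ((s0 :: s1 :: m'' : List Int) : Multiset Int) := by simp
      rw [← hmul] at this
      simpa using this
    obtain ⟨x, Q, hQl, hQs, hQm⟩ := extract_pair hs0mem
    have hk' : P'.length + 1 = k := by simpa using hlen
    have hQl' : P'.length = Q.length := by simpa using hQl
    rw [hQm] at hmul
    have hmul' : (x ::ₘ (toMul Q : Multiset Int)) = s1 ::ₘ (↑m'' : Multiset Int) := by
      have : s0 ::ₘ (x ::ₘ (toMul Q : Multiset Int)) = s0 ::ₘ (s1 ::ₘ (↑m'' : Multiset Int)) := by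
        rw [hmul]; simp [← Multiset.cons_coe]
      exact (Multiset.cons_inj_right s0).mp this
    have hxmem : x = s1 ∨ x ∈ m'' := by
      have : x ∈ s1 ::ₘ (↑m'' : Multiset Int) := by rw [← hmul']; simp
      simpa using this
    have hs0x : min s0 x = s0 := by
      rcases hxmem with h | h
      · subst h; exact min_eq_left hs01
      · exact min_eq_left (hs0all x h)
    by_cases hx1 : x = s1
    · rw [hx1] at hmul'
      have hT : (toMul Q : Multiset Int) = (↑m'' : Multiset Int) :=
        (Multiset.cons_inj_right s1).mp hmul'
      have hle := ihk P'.length (by omega) Q m'' (by omega) hpw'' hT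
      rw [hQs, hs0x]
      have hE : evenSum (s0 :: s1 :: m'') = s0 + evenSum m'' := by simp [evenSum]
      rw [hE]; omega
    · -- s1 lies in another pair of Q
      have hs1T : s1 ∈ toMul Q := by
        have : s1 ∈ x ::ₘ (toMul Q : Multiset Int) := by rw [hmul']; simp
        rcases Multiset.mem_cons.mp this with h | h
        · exact absurd h.symm hx1
        · simpa using h
      obtain ⟨y, R, hRl, hRs, hRm⟩ := extract_pair hs1T
      rw [hRm] at hmul'
      have h2 : (x ::ₘ y ::ₘ (toMul R : Multiset Int)) = (↑m'' : Multiset Int) := by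
        have : s1 ::ₘ (x ::ₘ y ::ₘ (toMul R : Multiset Int)) = s1 ::ₘ (↑m'' : Multiset Int) := by
          rw [← hmul']
          simp only [← Multiset.singleton_add]; abel
        exact (Multiset.cons_inj_right s1).mp this
      have hxm : x ∈ m'' := by
        have : x ∈ (↑m'' : Multiset Int) := by rw [← h2]; simp
        simpa using this
      have hym : y ∈ m'' := by
        have : y ∈ (↑m'' : Multiset Int) := by rw [← h2]; simp
        simpa using this
      -- repaired pairing (x, y) :: R
      have hmulP'' : (toMul ((x, y) :: R) : Multiset Int) = (↑m'' : Multiset Int) := by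
        have hc : toMul ((x, y) :: R) = x :: y :: toMul R := rfl
        rw [hc, ← h2]; simp [← Multiset.cons_coe]
      have hRl' : R.length + 1 = P'.length := by
        have : Q.length = R.length + 1 := by simpa using hRl
        omega
      have hlenP'' : ((x, y) :: R).length = P'.length := by simp [hRl']
      have hle := ihk P'.length (by omega) ((x, y) :: R) m'' hlenP'' hpw'' hmulP''
      have hmsum : msum ((x, y) :: R) = min x y + msum R := by simp [msum]
      have hs1y : min s1 y = s1 := min_eq_left (hs1all y hym)
      have hminxy : s1 ≤ min x y := le_min (hs1all x hxm) (hs1all y hym)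
      have hE : evenSum (s0 :: s1 :: m'') = s0 + evenSum m'' := by simp [evenSum]
      rw [hQs, hs0x, hRs, hs1y, hE]
      rw [hmsum] at hle
      linarith

-- the adjacent pairing of a sorted list attains it
def adjPairs : List Int → List (Int × Int)
  | [] => []
  | [_] => []
  | a :: b :: t => (a, b) :: adjPairs t

theorem toMul_adjPairs : ∀ (m : List Int), m.length % 2 = 0 → toMul (adjPairs m) = m := by
  intro m
  induction m using adjPairs.induct with
  | case1 => intro _; rfl
  | case2 x => intro h; simp at h
  | case3 a b t ih =>
    intro h
    simp only [adjPairs, toMul, List.flatMap_cons] at ih ⊢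
    simp only [List.length_cons] at h
    rw [ih (by omega)]
    rfl

theorem msum_adjPairs : ∀ (m : List Int), m.length % 2 = 0 → m.Pairwise (· ≤ ·) → msum (adjPairs m) = evenSum m := by
  intro m
  induction m using adjPairs.induct with
  | case1 => intro _ _; simp [adjPairs, msum, evenSum]
  | case2 x => intro hl _; simp at hl
  | case3 a b t ih =>
    intro hl h
    have hl' : t.length % 2 = 0 := by simp at hl; omega
    have hab : a ≤ b := (List.pairwise_cons.mp h).1 b (by simp)
    have ht : t.Pairwise (· ≤ ·) := ((List.pairwise_cons.mp (List.pairwise_cons.mp h).2).2)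
    simp only [adjPairs, msum, List.map_cons, List.sum_cons, evenSum, List.drop_succ_cons,
      List.drop_zero] at ih ⊢
    rw [ih hl' ht, min_eq_left hab]

theorem length_adjPairs : ∀ (m : List Int), (adjPairs m).length = m.length / 2 := by
  intro m
  induction m using adjPairs.induct with
  | case1 => simp [adjPairs]
  | case2 x => simp [adjPairs]
  | case3 a b t ih => simp [adjPairs, ih]; omega

-- a member of xs sits at an index, and removing that index is a permutation of removing it
theorem exists_index_of_mem : ∀ {xs : List Int} {a : Int}, a ∈ xs →
    ∃ i, i < xs.length ∧ xs[i]? = some a ∧ (a :: xs.eraseIdx i).Perm xs := by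
  intro xs
  induction xs with
  | nil => intro a h; simp at h
  | cons x t ih =>
    intro a h
    rcases List.mem_cons.mp h with h1 | h2
    · exact ⟨0, by simp, by simp [h1], by subst h1; simp⟩
    · obtain ⟨i, hi, hget, hperm⟩ := ih h2
      refine ⟨i + 1, by simpa using hi, by simpa using hget, ?_⟩
      have h1 : (x :: t).eraseIdx (i + 1) = x :: t.eraseIdx i := by simp
      rw [h1]
      exact (List.Perm.swap x a _).trans (hperm.cons x)

-- every rearrangement of xs is produced by PySem.List.permutations xs xs.length
theorem mem_permutations_of_perm : ∀ {p xs : List Int}, p.Perm xs → p ∈ PySem.List.permutations xs xs.length := by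
  intro p
  induction p with
  | nil =>
    intro xs h
    have : xs = [] := h.nil_eq.symm
    subst this
    show ([] : List Int) ∈ PySem.List.permutations ([] : List Int) 0
    rw [PySem.List.permutations]
    simp
  | cons a p' ih =>
    intro xs h
    have hmem : a ∈ xs := h.subset (by simp)
    obtain ⟨i, hi, hget, hperm⟩ := exists_index_of_mem hmem
    have hp' : p'.Perm (xs.eraseIdx i) := by
      have := h.trans hperm.symm
      exact this.cons_inv
    have hlen : xs.length = p'.length + 1 := by
      have := h.length_eq
      simpa using this.symm
    rw [hlen, PySem.List.permutations]
    apply List.mem_flatMap.mpr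
    refine ⟨i, by simpa using hi, ?_⟩
    simp only [hget]
    apply List.mem_map.mpr
    refine ⟨p', ?_, rfl⟩
    have hel : (xs.eraseIdx i).length = p'.length := by
      rw [List.length_eraseIdx]
      rw [if_pos hi]
      omega
    rw [← hel]
    exact ih hp'

theorem contains_ofList (s : List Int) (x : Int) :
    PySem.Set.contains (PySem.Set.ofList s) x = s.contains x := by
  have h := PySem.Set.mem_ofList s x
  simp only [PySem.Set.contains, List.contains_eq_mem]
  by_cases hx : x ∈ s <;> simp [h, hx]

-- a sublist together with the complement filter is a permutation of a duplicate-free list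
theorem sublist_append_filter_perm : ∀ {s l : List Int}, s.Sublist l → l.Nodup →
    (s ++ l.filter (fun x => !(PySem.Set.contains (PySem.Set.ofList s) x))).Perm l := by
  intro s l hsub
  simp only [contains_ofList, List.contains_eq_mem]
  induction hsub with
  | slnil => intro _; simp
  | @cons s' l' a hsub ih =>
    intro hnd
    have hal : a ∉ l' := (List.nodup_cons.mp hnd).1
    have has : a ∉ s' := fun hc => hal (hsub.subset hc)
    have h1 : (a :: l').filter (fun x => !decide (x ∈ s'))
        = a :: l'.filter (fun x => !decide (x ∈ s')) := by simp [has]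
    rw [h1]
    exact List.perm_middle.trans ((ih (List.nodup_cons.mp hnd).2).cons a)
  | @cons₂ s' l' a hsub ih =>
    intro hnd
    have hal : a ∉ l' := (List.nodup_cons.mp hnd).1
    have hfilt : (a :: l').filter (fun x => !decide (x ∈ a :: s'))
        = l'.filter (fun x => !decide (x ∈ s')) := by
      have hca : (!decide (a ∈ a :: s')) = false := by simp
      rw [List.filter_cons, hca]
      simp only [Bool.false_eq_true, if_false]
      apply List.filter_congr
      intro x hx
      have hxa : x ≠ a := fun hc => hal (hc ▸ hx)
      simp [hxa]
    rw [hfilt]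
    exact (ih (List.nodup_cons.mp hnd).2).cons a

-- realign a pairing so that its second components are exactly a given enumeration
theorem align_pairs : ∀ (pb : List Int) (P : List (Int × Int)),
    ((P.map (·.2) : List Int) : Multiset Int) = (pb : Multiset Int) →
    ∃ P' : List (Int × Int), P'.Perm P ∧ P'.map (·.2) = pb := by
  intro pb
  induction pb with
  | nil =>
    intro P h
    have : P.map (·.2) = [] := by simpa using h
    have : P = [] := by simpa using this
    exact ⟨[], by simp [this], rfl⟩
  | cons b pb' ih =>
    intro P h
    have hb : b ∈ P.map (·.2) := by
      have : b ∈ ((P.map (·.2) : List Int) : Multiset Int) := by rw [h]; simp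
      simpa using this
    obtain ⟨q, hq, hq2⟩ := List.mem_map.mp hb
    have hPe : P.Perm (q :: P.erase q) := List.perm_cons_erase hq
    have hmap : ((P.map (·.2) : List Int) : Multiset Int)
        = b ::ₘ (((P.erase q).map (·.2) : List Int) : Multiset Int) := by
      have := (hPe.map (·.2))
      rw [Multiset.coe_eq_coe.mpr this]
      simp [← Multiset.cons_coe, hq2]
    have hrec : (((P.erase q).map (·.2) : List Int) : Multiset Int) = (pb' : Multiset Int) := by
      have : b ::ₘ (((P.erase q).map (·.2) : List Int) : Multiset Int) = b ::ₘ (pb' : Multiset Int) := by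
        rw [← hmap, h]; simp [← Multiset.cons_coe]
      exact (Multiset.cons_inj_right b).mp this
    obtain ⟨P'', hP''p, hP''m⟩ := ih (P.erase q) hrec
    exact ⟨q :: P'', (hP''p.cons q).trans hPe.symm, by simp [hP''m, hq2]⟩

-- the indexed inner loop is zipWith min
theorem range_min_eq_zipWith : ∀ (pp pb : List Int), pp.length = pb.length →
    (List.range pp.length).map (fun j => min (pp.getD j 0) (pb.getD j 0)) = List.zipWith min pp pb := by
  intro pp
  induction pp with
  | nil => intro pb _; simp
  | cons a pp ih =>
    intro pb hlen
    cases pb with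
    | nil => simp at hlen
    | cons b pb =>
      simp only [List.length_cons, List.range_succ_eq_map, List.map_cons, List.map_map,
        List.zipWith_cons_cons, List.getD_cons_zero]
      congr 1
      rw [← ih pb (by simpa using hlen)]
      apply List.map_congr_left
      intro j _
      simp [Function.comp]

theorem toMul_zip : ∀ (pp pb : List Int), pp.length = pb.length →
    (toMul (List.zip pp pb) : Multiset Int) = (pp : Multiset Int) + (pb : Multiset Int) := by
  intro pp
  induction pp with
  | nil => intro pb h; cases pb <;> simp_all [toMul]
  | cons a pp ih =>
    intro pb hlen
    cases pb with
    | nil => simp at hlen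
    | cons b pb =>
      have := ih pb (by simpa using hlen)
      simp only [List.zip_cons_cons, toMul, List.flatMap_cons] at this ⊢
      simp only [← Multiset.cons_coe, Multiset.cons_add, List.cons_append, List.nil_append]
      simp [this]
      exact List.perm_middle.symm

theorem max?_eq_of (out : List Int) (E : Int) (hmem : E ∈ out) (hub : ∀ y ∈ out, y ≤ E) :
    PySem.List.max? out (fun x => x) = some E := by
  cases h : PySem.List.max? out (fun x => x) with
  | none =>
    rw [PySem.List.max?_eq_none_iff] at h
    subst h; simp at hmem
  | some m =>
    have hm := PySem.List.max?_mem h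
    have hmax := PySem.List.max?_isMax h E hmem
    have : m = E := le_antisymm (hub m hm) hmax
    rw [this]

theorem msum_perm {P Q : List (Int × Int)} (h : P.Perm Q) : msum P = msum Q :=
  List.Perm.sum_eq (h.map _)

theorem msum_zip : ∀ (pp pb : List Int), msum (List.zip pp pb) = (List.zipWith min pp pb).sum := by
  intro pp
  induction pp with
  | nil => intro pb; simp [msum]
  | cons a pp ih =>
    intro pb
    cases pb with
    | nil => simp [msum]
    | cons b pb =>
      have hp := ih pb
      simp only [msum] at hp ⊢
      simp only [List.zip_cons_cons, List.map_cons, List.sum_cons, List.zipWith_cons_cons]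
      rw [hp]

theorem toMul_split : ∀ (P : List (Int × Int)),
    (toMul P : Multiset Int) = ↑(P.map (·.1)) + ↑(P.map (·.2)) := by
  intro P
  induction P with
  | nil => simp [toMul]
  | cons q P ih =>
    have hc : toMul (q :: P) = q.1 :: q.2 :: toMul P := rfl
    rw [hc]
    simp only [List.map_cons, ← Multiset.cons_coe]
    rw [ih]
    simp only [← Multiset.singleton_add]
    abel

-- the inner Python loop 'for i in range(hl): s += min(pp[i], pb[i])'
theorem inner_eq (pp pb : List Int) (k : Nat) (hpp : pp.length = k) (hpb : pb.length = k) :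
    (PySem.List.pyRange 0 ((k : Nat) : Int) 1).foldl
      (fun s i => s + min (PySem.List.pyGetD pp i 0) (PySem.List.pyGetD pb i 0)) 0
    = (List.zipWith min pp pb).sum := by
  rw [PySem.List.foldl_add, PySem.List.pyRange_zero_nat, List.map_map]
  have hfun : ((fun i => min (PySem.List.pyGetD pp i 0) (PySem.List.pyGetD pb i 0)) ∘ (fun j : Nat => (j : Int)))
      = fun j : Nat => min (pp.getD j 0) (pb.getD j 0) := by
    funext j
    simp [Function.comp, PySem.List.pyGetD_natCast]
  rw [hfun, ← hpp, range_min_eq_zipWith pp pb (by omega)]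
  simp

-- pa together with pb enumerates exactly the elements of n
theorem papb_perm (n px : List Int)
    (hsub : px.Sublist (PySem.List.pyRange 0 ((n.length : Int)) 1)) :
    ((px.map (fun i => PySem.List.pyGetD n i 0)) ++
      (((PySem.List.pyRange 0 ((n.length : Int)) 1).filter
          (fun i => !(PySem.Set.contains (PySem.Set.ofList px) i))).map
        (fun i => PySem.List.pyGetD n i 0))).Perm n := by
  have h1 := sublist_append_filter_perm hsub (PySem.List.nodup_pyRange_one 0 ((n.length : Int)))
  have h2 := h1.map (fun i => PySem.List.pyGetD n i 0)
  rw [List.map_append] at h2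
  rwa [PySem.List.map_pyGetD_pyRange_zero'] at h2

-- every value produced by A's double loop is at most the sorted even-position sum
theorem out_elem_le (n m : List Int) (k : Nat) (hk2 : n.length = 2 * k)
    (hmn : m.Perm n) (hpw : m.Pairwise (· ≤ ·)) (px pp : List Int)
    (hpx : px ∈ PySem.List.combinations (PySem.List.pyRange 0 ((n.length : Int)) 1) k)
    (hppm : pp ∈ PySem.List.permutations (px.map (fun i => PySem.List.pyGetD n i 0))
      (px.map (fun i => PySem.List.pyGetD n i 0)).length) :
    (PySem.List.pyRange 0 ((k : Nat) : Int) 1).foldl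
      (fun s i => s + min (PySem.List.pyGetD pp i 0)
        (PySem.List.pyGetD (((PySem.List.pyRange 0 ((n.length : Int)) 1).filter
            (fun i => !(PySem.Set.contains (PySem.Set.ofList px) i))).map
          (fun i => PySem.List.pyGetD n i 0)) i 0)) 0 ≤ evenSum m := by
  obtain ⟨hsub, hlenpx⟩ := (PySem.List.mem_combinations_iff _ _ _).mp hpx
  set pa := px.map (fun i => PySem.List.pyGetD n i 0) with hpadef
  set pb := ((PySem.List.pyRange 0 ((n.length : Int)) 1).filter
      (fun i => !(PySem.Set.contains (PySem.Set.ofList px) i))).map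
    (fun i => PySem.List.pyGetD n i 0) with hpbdef
  have hpapb : (pa ++ pb).Perm n := papb_perm n px hsub
  have hpal : pa.length = k := by simp [hpadef, hlenpx]
  have hpbl : pb.length = k := by
    have hl := hpapb.length_eq
    simp only [List.length_append, hpal, hk2] at hl
    omega
  have hppa : pp.Perm pa := PySem.List.perm_of_mem_permutations hppm
  have hppl : pp.length = k := by rw [hppa.length_eq, hpal]
  rw [inner_eq pp pb k hppl hpbl, ← msum_zip]
  apply msum_le_evenSum k (pp.zip pb) m (by simp [hppl, hpbl]) hpw
  rw [toMul_zip pp pb (by omega)]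
  have hc : (↑pp : Multiset Int) = (↑pa : Multiset Int) := Multiset.coe_eq_coe.mpr hppa
  rw [hc, Multiset.coe_add, Multiset.coe_eq_coe]
  exact hpapb.trans hmn.symm

-- the sorted even-position sum is attained by A's double loop
theorem out_attains (n m : List Int) (k : Nat) (hk2 : n.length = 2 * k)
    (hmn : m.Perm n) (hpw : m.Pairwise (· ≤ ·)) :
    ∃ px ∈ PySem.List.combinations (PySem.List.pyRange 0 ((n.length : Int)) 1) k,
      ∃ pp ∈ PySem.List.permutations (px.map (fun i => PySem.List.pyGetD n i 0))
          (px.map (fun i => PySem.List.pyGetD n i 0)).length,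
        (PySem.List.pyRange 0 ((k : Nat) : Int) 1).foldl
          (fun s i => s + min (PySem.List.pyGetD pp i 0)
            (PySem.List.pyGetD (((PySem.List.pyRange 0 ((n.length : Int)) 1).filter
                (fun i => !(PySem.Set.contains (PySem.Set.ofList px) i))).map
              (fun i => PySem.List.pyGetD n i 0)) i 0)) 0 = evenSum m := by
  have hml : m.length = n.length := hmn.length_eq
  set P0 := adjPairs m with hP0
  have hP0len : P0.length = k := by rw [hP0, length_adjPairs]; omega
  have hP0mul : (toMul P0 : Multiset Int) = (↑n : Multiset Int) := by
    rw [hP0, toMul_adjPairs m (by omega)]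
    exact Multiset.coe_eq_coe.mpr hmn
  have hA_le : ((P0.map (·.1) : List Int) : Multiset Int) ≤ (↑n : Multiset Int) := by
    rw [← hP0mul, toMul_split]
    exact Multiset.le_add_right _ _
  obtain ⟨t, htp, hts⟩ := Multiset.coe_le.mp hA_le
  have hnmap : n = (PySem.List.pyRange 0 ((n.length : Int)) 1).map
      (fun j => PySem.List.pyGetD n j 0) := (PySem.List.map_pyGetD_pyRange_zero' n 0).symm
  rw [hnmap] at hts
  obtain ⟨px, hpxsub, hpxmap⟩ := List.sublist_map_iff.mp hts
  have htlen : t.length = k := by rw [htp.length_eq]; simp [hP0len]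
  have hpx : px ∈ PySem.List.combinations (PySem.List.pyRange 0 ((n.length : Int)) 1) k := by
    apply (PySem.List.mem_combinations_iff _ _ _).mpr
    refine ⟨hpxsub, ?_⟩
    have := congrArg List.length hpxmap
    simp at this
    omega
  set pa := px.map (fun i => PySem.List.pyGetD n i 0) with hpadef
  have hpa_t : pa = t := by rw [hpadef, hpxmap]
  set pb := ((PySem.List.pyRange 0 ((n.length : Int)) 1).filter
      (fun i => !(PySem.Set.contains (PySem.Set.ofList px) i))).map
    (fun i => PySem.List.pyGetD n i 0) with hpbdef
  have hpapb : (pa ++ pb).Perm n := papb_perm n px hpxsub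
  have hpal : pa.length = k := by rw [hpa_t, htlen]
  have hpbl : pb.length = k := by
    have hl := hpapb.length_eq
    simp only [List.length_append, hpal, hk2] at hl
    omega
  have hBmul : ((P0.map (·.2) : List Int) : Multiset Int) = (↑pb : Multiset Int) := by
    have h1 : (↑pa : Multiset Int) + ↑pb = ↑(P0.map (·.1)) + ↑(P0.map (·.2)) := by
      rw [Multiset.coe_add, ← toMul_split, hP0mul, Multiset.coe_eq_coe]
      exact hpapb
    have h2 : (↑pa : Multiset Int) = ↑(P0.map (·.1)) := by
      rw [hpa_t]
      exact (Multiset.coe_eq_coe.mpr htp)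
    rw [h2] at h1
    exact (add_left_cancel h1).symm
  obtain ⟨P', hP'perm, hP'map⟩ := align_pairs pb P0 hBmul
  set pp := P'.map (·.1) with hppdef
  have hppa : pp.Perm pa := by
    apply Multiset.coe_eq_coe.mp
    have h3 : (↑pp : Multiset Int) = ((P0.map (·.1) : List Int) : Multiset Int) :=
      Multiset.coe_eq_coe.mpr (hP'perm.map (·.1))
    rw [h3, hpa_t]
    exact (Multiset.coe_eq_coe.mpr htp).symm
  have hppl : pp.length = k := by rw [hppa.length_eq, hpal]
  refine ⟨px, hpx, pp, mem_permutations_of_perm hppa, ?_⟩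
  rw [inner_eq pp pb k hppl hpbl, ← msum_zip]
  have hz : pp.zip pb = P' := by
    rw [hppdef, ← hP'map, List.zip_map']
    simp
  rw [hz, msum_perm hP'perm, hP0]
  exact msum_adjPairs m (by omega) hpw

-- the two programs agree
theorem arraypairing_eq_alt (n : List Int) : arraypairing n = arraypairing_alt n := by
  have hmod : PySem.Int.mod ((n.length : Int)) 2 = ((n.length % 2 : Nat) : Int) := by
    exact_mod_cast PySem.Int.mod_natCast n.length 2
  by_cases hodd : n.length % 2 = 1
  · have hcast : ((n.length : Int)) % 2 = 1 := by omega
    simp [arraypairing, arraypairing_alt, hcast]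
  · have h0 : n.length % 2 = 0 := by omega
    have hcond : (PySem.Int.mod ((n.length : Int)) 2 == 1) = false := by
      rw [hmod, h0]; decide
    set k := n.length / 2 with hkdef
    have hk2 : n.length = 2 * k := by omega
    have hfl : PySem.Int.floordiv ((n.length : Int)) 2 = ((k : Nat) : Int) := by
      rw [hkdef]
      exact_mod_cast PySem.Int.floordiv_natCast n.length 2
    unfold arraypairing arraypairing_alt
    simp only [hcond, Bool.false_eq_true, if_false, hfl, Int.toNat_natCast,
      PySem.List.foldl_append_singleton_eq_map, PySem.List.foldl_append_eq_flatMap,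
      List.nil_append]
    set m := PySem.List.sorted n (fun x => x) false with hmdef
    have hmn : m.Perm n := PySem.List.sorted_perm n _ false
    have hpw : m.Pairwise (· ≤ ·) := by
      have := PySem.List.sorted_pairwise n (fun x => x)
      simpa using this
    rw [altLoop_eq]
    rw [max?_eq_of _ (evenSum m) ?hmem ?hub]
    · simp
    case hub =>
      intro s hs
      obtain ⟨px, hpx, hs2⟩ := List.mem_flatMap.mp hs
      obtain ⟨pp, hppm, heq⟩ := List.mem_map.mp hs2
      rw [← heq]
      exact out_elem_le n m k hk2 hmn hpw px pp hpx hppm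
    case hmem =>
      obtain ⟨px, hpx, pp, hppm, hval⟩ := out_attains n m k hk2 hmn hpw
      exact List.mem_flatMap.mpr ⟨px, hpx, List.mem_map.mpr ⟨pp, hppm, hval⟩⟩

-- ===== VERDICT (by name: the statement is the Claim_ definition above) =====
theorem arraypairing_spec : Claim_equal_arraypairing := by
  intro n _
  unfold Spec_arraypairing
  exact arraypairing_eq_alt n
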